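-- pv_equiv track=rewrite | github.com/Shingwha/mocode | mocode/gateway/feishu/card.py | split_elements_by_table_limit
-- ===== SOURCE A (Python) =====
-- def split_elements_by_table_limit(elements: list[dict], max_tables: int = 1) -> list[list[dict]]:
--     """Split card elements into groups with at most max_tables table elements each."""
--     if not elements:
--         return [[]]
--     groups: list[list[dict]] = []
--     current: list[dict] = []
--     table_count = 0
--     for el in elements:
--         if el.get("tag") == "table":
--             if table_count >= max_tables:
--                 if current:
--                     groups.append(current)
--                 current = []
--                 table_count = 0
--             current.append(el)
--             table_count += 1
--         else:
--             current.append(el)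
--     if current:
--         groups.append(current)
--     return groups or [[]]
-- ===== SOURCE B (Python) =====
-- def _take_group(rest: list[dict], max_tables: int) -> tuple[list[dict], list[dict]]:
--     """Take one group off the front of rest; return (group, remainder).
--
--     A group ends just before a table element once it already holds
--     max_tables tables (the leading element is always taken, so the
--     returned group is nonempty whenever rest is)."""
--     group: list[dict] = []
--     count = 0
--     for el in rest:
--         if el.get("tag") == "table":
--             if count >= max_tables and group:
--                 return group, rest[len(group):]
--             count += 1
--         group.append(el)
--     return group, []
--
--
-- def split_elements_by_table_limit(elements: list[dict], max_tables: int = 1) -> list[list[dict]]: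
--     """Split card elements into groups with at most max_tables table elements each."""
--     groups: list[list[dict]] = []
--     rest = elements
--     while rest:
--         group, rest = _take_group(rest, max_tables)
--         groups.append(group)
--     return groups or [[]]
-- ===== Notes on version B (the rewrite author's own statement) =====
-- stated objective: alternative
-- what changed: Replaces A's single accumulating pass (groups/current/table_count state with reset logic) by a group-at-a-time decomposition: a helper peels one maximal group off the front of the list and the main loop repeatedly applies it, so no cross-group state is kept.
import Mathlib
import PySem

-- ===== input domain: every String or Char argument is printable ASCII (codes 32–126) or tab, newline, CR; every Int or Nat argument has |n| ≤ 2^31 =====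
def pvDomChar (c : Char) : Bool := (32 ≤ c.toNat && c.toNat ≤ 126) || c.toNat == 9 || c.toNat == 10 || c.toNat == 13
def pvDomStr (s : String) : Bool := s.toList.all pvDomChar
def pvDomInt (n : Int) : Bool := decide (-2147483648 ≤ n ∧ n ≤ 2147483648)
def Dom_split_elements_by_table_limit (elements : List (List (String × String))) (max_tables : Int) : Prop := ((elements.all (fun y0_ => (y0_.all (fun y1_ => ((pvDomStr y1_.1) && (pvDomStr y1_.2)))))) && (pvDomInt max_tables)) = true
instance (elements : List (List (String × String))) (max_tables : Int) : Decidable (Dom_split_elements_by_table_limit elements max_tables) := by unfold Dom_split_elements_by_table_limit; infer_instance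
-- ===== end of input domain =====

-- B replaces A's one accumulating pass (groups/current/table_count with reset logic) by a
-- group-at-a-time decomposition: a helper peels one group off the front, the main loop repeats it.

-- ===== PORT A =====

-- one iteration of A's for-loop; state = (groups, current, table_count)
def pvStepA (max_tables : Int)
    (s : List (List (List (String × String))) × List (List (String × String)) × Int)
    (el : List (String × String)) :
    List (List (List (String × String))) × List (List (String × String)) × Int :=
  let (groups, current, table_count) := s
  if (PySem.Dict.mk el).get? "tag" = some "table" then
    if table_count ≥ max_tables then
      ((if current ≠ [] then groups ++ [current] else groups), [el], 1)
    else
      (groups, current ++ [el], table_count + 1)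
  else
    (groups, current ++ [el], table_count)

def split_elements_by_table_limit (elements : List (List (String × String))) (max_tables : Int) : List (List (List (String × String))) :=
  if elements = [] then [[]]
  else
    let s := elements.foldl (pvStepA max_tables) ([], [], 0)
    let groups := if s.2.1 ≠ [] then s.1 ++ [s.2.1] else s.1
    if groups = [] then [[]] else groups

-- ===== PORT B =====

-- _take_group's for-loop: consume rest, building group and counting tables, early return at a split
-- (rest[len(group):] is exactly the not-yet-consumed suffix el :: tl)
def pvTakeGo (max_tables : Int) (group : List (List (String × String))) (count : Int) :
    List (List (String × String)) → List (List (String × String)) × List (List (String × String))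
  | [] => (group, [])
  | el :: tl =>
    if (PySem.Dict.mk el).get? "tag" = some "table" then
      if count ≥ max_tables ∧ group ≠ [] then (group, el :: tl)
      else pvTakeGo max_tables (group ++ [el]) (count + 1) tl
    else pvTakeGo max_tables (group ++ [el]) count tl

theorem pvTakeGo_len (max_tables : Int) :
    ∀ (rem group : List (List (String × String))) (count : Int),
      (pvTakeGo max_tables group count rem).2.length ≤ rem.length := by
  intro rem
  induction rem with
  | nil => intro g c; simp [pvTakeGo]
  | cons el tl ih =>
    intro g c
    simp only [pvTakeGo]
    split
    · split
      · simp
      · exact le_trans (ih _ _) (Nat.le_succ _)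
    · exact le_trans (ih _ _) (Nat.le_succ _)

theorem pvTakeGo_nil_len (max_tables : Int) (count : Int)
    (el : List (String × String)) (tl : List (List (String × String))) :
    (pvTakeGo max_tables [] count (el :: tl)).2.length < (el :: tl).length := by
  simp only [pvTakeGo]
  split
  · simp only [ne_eq, not_true_eq_false, and_false, if_false]
    exact Nat.lt_succ_of_le (pvTakeGo_len max_tables tl _ _)
  · exact Nat.lt_succ_of_le (pvTakeGo_len max_tables tl _ _)

-- Source B's while-loop over rest (each pass calls _take_group and appends its group)
def pvSplitLoop (max_tables : Int) : List (List (String × String)) → List (List (List (String × String)))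
  | [] => []
  | el :: tl =>
    let p := pvTakeGo max_tables [] 0 (el :: tl)
    p.1 :: pvSplitLoop max_tables p.2
termination_by rest => rest.length
decreasing_by
  exact pvTakeGo_nil_len max_tables 0 el tl

def split_elements_by_table_limit_alt (elements : List (List (String × String))) (max_tables : Int) : List (List (List (String × String))) :=
  let groups := pvSplitLoop max_tables elements
  if groups = [] then [[]] else groups

-- ===== PRECONDITION & SPEC =====
def Spec_split_elements_by_table_limit (elements : List (List (String × String))) (max_tables : Int) (out : List (List (List (String × String)))) : Prop := out = split_elements_by_table_limit_alt elements max_tables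
instance (elements : List (List (String × String))) (max_tables : Int) (out : List (List (List (String × String)))) : Decidable (Spec_split_elements_by_table_limit elements max_tables out) := by unfold Spec_split_elements_by_table_limit; infer_instance

-- ===== CLAIM (what is proved, stated in full; the proofs are below) =====
def Claim_equal_split_elements_by_table_limit : Prop := ∀ (elements : List (List (String × String))) (max_tables : Int), Dom_split_elements_by_table_limit elements max_tables → Spec_split_elements_by_table_limit elements max_tables (split_elements_by_table_limit elements max_tables)

-- ===== LEMMAS AND PROOFS =====

-- a group started nonempty stays nonempty
theorem pvTakeGo_ne (max_tables : Int) :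
    ∀ (rem group : List (List (String × String))) (count : Int), group ≠ [] →
      (pvTakeGo max_tables group count rem).1 ≠ [] := by
  intro rem
  induction rem with
  | nil => intro g c h; simpa [pvTakeGo] using h
  | cons el tl ih =>
    intro g c h
    simp only [pvTakeGo]
    split
    · split
      · exact h
      · exact ih _ _ (by simp)
    · exact ih _ _ (by simp)

-- continue B's current (partially built) group with state (cur, cnt), then keep looping
def pvCont (max_tables : Int) (cur : List (List (String × String))) (cnt : Int)
    (rem : List (List (String × String))) : List (List (List (String × String))) :=
  let p := pvTakeGo max_tables cur cnt rem
  (if p.1 = [] then [] else [p.1]) ++ pvSplitLoop max_tables p.2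

-- with a nonempty current group the guard in pvCont is vacuous, and pvSplitLoop on a
-- nonempty rest IS pvCont of a fresh group
theorem pvSplitLoop_cons (max_tables : Int) (el : List (String × String))
    (tl : List (List (String × String))) :
    pvSplitLoop max_tables (el :: tl) = pvCont max_tables [] 0 (el :: tl) := by
  rw [pvSplitLoop, pvCont]
  have h : (pvTakeGo max_tables [] 0 (el :: tl)).1 ≠ [] := by
    simp only [pvTakeGo]
    split
    · simp only [ne_eq, not_true_eq_false, and_false, if_false]
      exact pvTakeGo_ne max_tables tl [el] 1 (by simp)
    · exact pvTakeGo_ne max_tables tl [el] 0 (by simp)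
  simp [h]

-- key invariant: A's fold-and-finish from state (groups, cur, cnt) equals groups ++ B's continuation
theorem pvKey (max_tables : Int) :
    ∀ (rem : List (List (String × String))) (groups : List (List (List (String × String))))
      (cur : List (List (String × String))) (cnt : Int), (cur = [] → cnt = 0) →
      (let s := rem.foldl (pvStepA max_tables) (groups, cur, cnt)
       if s.2.1 ≠ [] then s.1 ++ [s.2.1] else s.1) = groups ++ pvCont max_tables cur cnt rem := by
  intro rem
  induction rem with
  | nil =>
    intro groups cur cnt _
    simp only [List.foldl_nil, pvCont, pvTakeGo, pvSplitLoop]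
    by_cases h : cur = [] <;> simp [h]
  | cons el tl ih =>
    intro groups cur cnt hinv
    simp only [List.foldl_cons, pvStepA]
    by_cases ht : (PySem.Dict.mk el).get? "tag" = some "table"
    · simp only [ht, if_true]
      by_cases hc : cnt ≥ max_tables
      · simp only [hc, if_true]
        rw [ih _ _ _ (by simp)]
        by_cases hcur : cur = []
        · -- current empty: A's split is a no-op; B never closed the group
          have hcnt : cnt = 0 := hinv hcur
          subst hcur hcnt
          simp only [ne_eq, not_true_eq_false, if_false]
          simp only [pvCont, pvTakeGo, ht, if_true, ne_eq, not_true_eq_false, and_false,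
            if_false, List.nil_append, zero_add]
        · -- current nonempty: A closes it; B's take_group returns it and restarts
          simp only [hcur, ne_eq, not_false_eq_true, if_true]
          conv_rhs => rw [pvCont]
          simp only [pvTakeGo, ht, if_true, hc, hcur, ne_eq, not_false_eq_true, and_self,
            if_true, pvSplitLoop_cons, pvCont, List.nil_append, zero_add,
            not_true_eq_false, and_false, if_false]
          simp [List.append_assoc]
      · simp only [hc, if_false]
        rw [ih _ _ _ (by simp)]
        simp only [pvCont, pvTakeGo, ht, if_true, hc, false_and, if_false]
    · simp only [ht, if_false]
      rw [ih _ _ _ (by simp)]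
      simp only [pvCont, pvTakeGo, ht, if_false]
  
-- ===== VERDICT (by name: the statement is the Claim_ definition above) =====
theorem split_elements_by_table_limit_spec : Claim_equal_split_elements_by_table_limit := by
  intro elements max_tables _
  unfold Spec_split_elements_by_table_limit split_elements_by_table_limit split_elements_by_table_limit_alt
  cases elements with
  | nil => simp [pvSplitLoop]
  | cons el tl =>
    simp only [reduceCtorEq, if_false]
    rw [pvKey max_tables (el :: tl) [] [] 0 (fun _ => rfl)]
    rw [pvSplitLoop_cons]
    simp
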